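-- pv_equiv track=rewrite | github.com/Andrew-Foote/aoc | solutions/python/y2023/d25.py | connected_set
-- ===== SOURCE A (Python) =====
-- from collections import defaultdict
--
-- def graph_as_dict(g: set[tuple[str, str]]):
-- 	d = defaultdict(lambda: set())
--
-- 	for e1, e2 in g:
-- 		d[e1].add(e2)
-- 		d[e2].add(e1)
--
-- 	return d
--
-- def connected_set(g: set[tuple[str, str]], n: str) -> set[str]:
-- 	d = graph_as_dict(g)
-- 	es = {n}
-- 	visited = set()
--
-- 	while es:
-- 		new_es = set()
--
-- 		for e in es:
-- 			visited.add(e)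
-- 			new_es.update(d[e] - visited)
--
-- 		es = new_es
--
-- 	return visited
-- ===== SOURCE B (Python) =====
-- from collections import defaultdict, deque
--
-- def graph_as_dict(g):
-- 	d = defaultdict(lambda: set())
--
-- 	for e1, e2 in g:
-- 		d[e1].add(e2)
-- 		d[e2].add(e1)
--
-- 	return d
--
-- def connected_set(g, n):
-- 	d = graph_as_dict(g)
-- 	visited = set()
-- 	queue = deque([n])
--
-- 	while queue:
-- 		v = queue.popleft()
--
-- 		if v in visited:
-- 			continue
--
-- 		visited.add(v)
-- 		queue.extend(x for x in d[v] if x not in visited)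
--
-- 	return visited
-- ===== Notes on version B (the rewrite author's own statement) =====
-- stated objective: simpler
-- what changed: Replaces the level-synchronized BFS over whole frontier sets (nested loop rebuilding a new_es set per level) with a single flat worklist loop: pop one node from a deque, skip it if visited, otherwise mark it and enqueue its unvisited neighbours.
import Mathlib
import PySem

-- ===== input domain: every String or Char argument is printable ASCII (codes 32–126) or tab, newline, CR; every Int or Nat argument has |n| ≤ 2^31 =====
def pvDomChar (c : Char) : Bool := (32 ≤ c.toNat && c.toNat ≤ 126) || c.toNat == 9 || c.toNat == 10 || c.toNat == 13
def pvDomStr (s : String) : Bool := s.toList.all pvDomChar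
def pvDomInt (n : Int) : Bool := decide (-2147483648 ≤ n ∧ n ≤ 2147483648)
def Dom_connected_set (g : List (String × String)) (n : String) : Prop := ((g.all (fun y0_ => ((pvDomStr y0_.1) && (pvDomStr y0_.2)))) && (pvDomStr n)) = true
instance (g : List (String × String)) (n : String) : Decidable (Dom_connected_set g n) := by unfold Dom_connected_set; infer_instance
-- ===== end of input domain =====

-- B replaces A's level-synchronized frontier-set BFS by a single-queue flood fill
-- (pop one node, skip it if already visited, else visit it and enqueue its unvisited
-- neighbours); same adjacency-dict builder, same returned set.

-- ===== PORT A =====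

-- d[e] on the defaultdict: reading a missing key inserts an empty set into d, which
-- changes only d's keys, never any value later read; `getD e []` returns the same
-- neighbour set, so the returned value is unaffected (exact for the result).
def pvNbrs (d : PySem.Dict String (List String)) (e : String) : List String :=
  PySem.Dict.getD d e []

def graphAsDict (g : List (String × String)) : PySem.Dict String (List String) :=
  g.foldl (fun d p =>
    let d1 := d.insert p.1 (PySem.Set.add (PySem.Dict.getD d p.1 []) p.2)
    d1.insert p.2 (PySem.Set.add (PySem.Dict.getD d1 p.2 []) p.1)) PySem.Dict.empty

-- while es: new_es = set(); for e in es: visited.add(e); new_es.update(d[e] - visited); es = new_es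
-- (fuel is only a totality guard; the proof shows it is never exhausted)
def loopA (d : PySem.Dict String (List String)) (visited es : List String) : Nat → List String
  | 0 => visited
  | fuel+1 =>
    if es.isEmpty then visited
    else
      let st := es.foldl (fun (st : List String × List String) e =>
        let v := PySem.Set.add st.1 e
        (v, PySem.Set.update st.2 (PySem.Set.diff (pvNbrs d e) v))) (visited, PySem.Set.empty)
      loopA d st.1 st.2 fuel

def connected_set (g : List (String × String)) (n : String) : List String :=
  let d := graphAsDict g
  loopA d PySem.Set.empty (PySem.Set.add PySem.Set.empty n)
    (2 * ((PySem.Dict.values d).flatMap id).length + 3)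

-- ===== PORT B =====

-- all neighbour-list entries of d, concatenated (universe for the termination measure)
def pvUniv (d : PySem.Dict String (List String)) : List String :=
  (PySem.Dict.values d).flatMap id

def pvMeasure (d : PySem.Dict String (List String)) (visited queue : List String) : Nat :=
  ((queue.toFinset ∪ (pvUniv d).toFinset) \ visited.toFinset).card

theorem pvNbrs_subset_univ (d : PySem.Dict String (List String)) (e : String) :
    ∀ y ∈ pvNbrs d e, y ∈ pvUniv d := by
  intro y hy
  unfold pvNbrs at hy
  rw [PySem.Dict.getD_eq_get?_getD] at hy
  cases h : PySem.Dict.get? d e with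
  | none => rw [h] at hy; simp at hy
  | some val =>
    rw [h] at hy; simp at hy
    have hitem := PySem.Dict.mem_items_of_get?_eq_some d h
    have hval : val ∈ PySem.Dict.values d := by
      simp only [PySem.Dict.values]
      exact List.mem_map.mpr ⟨(e, val), hitem, rfl⟩
    unfold pvUniv
    exact List.mem_flatMap.mpr ⟨val, hval, hy⟩

theorem pvMeasure_le (d : PySem.Dict String (List String)) (v q q' : List String)
    (h : ∀ y ∈ q', y ∈ q ∨ y ∈ pvUniv d) : pvMeasure d v q' ≤ pvMeasure d v q := by
  apply Finset.card_le_card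
  intro y hy
  simp only [Finset.mem_sdiff, Finset.mem_union, List.mem_toFinset] at hy ⊢
  rcases hy with ⟨hy1, hy2⟩
  exact ⟨hy1.elim (fun h' => h y h') Or.inr, hy2⟩

theorem pvMeasure_visit (d : PySem.Dict String (List String)) (v q q2 : List String) (x : String)
    (hxq : x ∈ q) (hxv : PySem.Set.contains v x = false)
    (hq2 : ∀ y ∈ q2, y ∈ q ∨ y ∈ pvUniv d) :
    pvMeasure d (PySem.Set.add v x) q2 < pvMeasure d v q := by
  apply Finset.card_lt_card
  rw [Finset.ssubset_iff_of_subset]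
  · exact ⟨x, by
      simp only [Finset.mem_sdiff, Finset.mem_union, List.mem_toFinset]
      constructor
      · exact ⟨Or.inl hxq, by
          intro hmem
          rw [(PySem.Set.contains_iff v x).mpr hmem] at hxv; exact absurd hxv (by simp)⟩
      · intro hmem
        rcases hmem with ⟨-, h2⟩
        exact h2 ((PySem.Set.mem_add _ _ _).mpr (Or.inr rfl))⟩
  · intro y hy
    simp only [Finset.mem_sdiff, Finset.mem_union, List.mem_toFinset] at hy ⊢
    rcases hy with ⟨hy1, hy2⟩
    refine ⟨?_, fun hmem => hy2 ((PySem.Set.mem_add _ _ _).mpr (Or.inl hmem))⟩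
    rcases hy1 with h1 | h1
    · exact hq2 y h1
    · exact Or.inr h1

def loopB (d : PySem.Dict String (List String)) (visited queue : List String) : List String :=
  match queue with
  | [] => visited
  | v :: rest =>
    if hc : PySem.Set.contains visited v then loopB d visited rest
    else
      let vis := PySem.Set.add visited v
      loopB d vis (rest ++ (pvNbrs d v).filter (fun x => !(PySem.Set.contains vis x)))
termination_by (pvMeasure d visited queue, queue.length)
decreasing_by
  · have h := pvMeasure_le d visited (v :: rest) rest (by intro y hy; exact Or.inl (List.mem_cons_of_mem _ hy))
    rcases Nat.lt_or_ge (pvMeasure d visited rest) (pvMeasure d visited (v :: rest)) with h' | h'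
    · exact Prod.Lex.left _ _ h'
    · have : pvMeasure d visited rest = pvMeasure d visited (v :: rest) := Nat.le_antisymm h h'
      rw [this]
      exact Prod.Lex.right _ (by simp)
  · apply Prod.Lex.left
    apply pvMeasure_visit d visited (v :: rest) _ v (List.mem_cons_self) (by simpa using hc)
    intro y hy
    rcases List.mem_append.mp hy with h | h
    · exact Or.inl (List.mem_cons_of_mem _ h)
    · exact Or.inr (pvNbrs_subset_univ d v y (List.mem_of_mem_filter h))

def connected_set_alt (g : List (String × String)) (n : String) : List String :=
  let d := graphAsDict g
  loopB d PySem.Set.empty [n]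

-- ===== PRECONDITION & SPEC =====
def Spec_connected_set (g : List (String × String)) (n : String) (out : List String) : Prop := out = connected_set_alt g n
instance (g : List (String × String)) (n : String) (out : List String) : Decidable (Spec_connected_set g n out) := by unfold Spec_connected_set; infer_instance

-- ===== CLAIM (what is proved, stated in full; the proofs are below) =====
def Claim_equal_connected_set : Prop := ∀ (g : List (String × String)) (n : String), Dom_connected_set g n → Spec_connected_set g n (connected_set g n)

-- ===== LEMMAS AND PROOFS =====

-- Python-set plumbing -------------------------------------------------------

theorem pv_contains_eq (s : PySem.Set String) (y : String) :
    PySem.Set.contains s y = decide (y ∈ s) := by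
  cases hc : PySem.Set.contains s y with
  | true => simp [(PySem.Set.contains_iff s y).mp hc]
  | false =>
    have h : y ∉ s := fun m => by
      rw [(PySem.Set.contains_iff s y).mpr m] at hc; cases hc
    simp [h]

theorem pv_discard_eq (s : PySem.Set String) (x : String) :
    s.discard x = s.filter (fun y => !(y == x)) := rfl

theorem pv_diff_eq (s t : PySem.Set String) :
    PySem.Set.diff s t = s.filter (fun y => !(PySem.Set.contains t y)) := rfl

theorem pv_dedup_filter (p : String → Bool) (l : List String) :
    PySem.List.dedup (l.filter p) = (PySem.List.dedup l).filter p := by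
  simp only [PySem.List.dedup_eq_ofList]
  induction l with
  | nil => rfl
  | cons a l ih =>
    by_cases hp : p a = true
    · simp only [List.filter_cons, hp, if_pos, PySem.Set.ofList_cons, ih, pv_discard_eq]
      rw [List.filter_filter, List.filter_filter]
      exact congrArg _ (List.filter_congr (fun x _ => by rw [Bool.and_comm]))
    · simp only [List.filter_cons, hp, PySem.Set.ofList_cons, pv_discard_eq]
      rw [List.filter_filter]
      simp only [Bool.false_eq_true, if_false]
      rw [ih]
      apply List.filter_congr
      intro x _
      cases hpx : p x
      · simp
      · have hxa : (x == a) = false := by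
          have hne : x ≠ a := fun h => hp (h ▸ hpx)
          simp [hne]
        simp [hxa]

theorem pv_dedup_append (l r : List String) :
    PySem.List.dedup (l ++ r) = PySem.Set.update (PySem.List.dedup l) r := by
  simp [PySem.Set.ofList_append]

theorem pv_dedup_idem (l : List String) :
    PySem.List.dedup (PySem.List.dedup l) = PySem.List.dedup l := by
  simp [PySem.Set.ofList_eq_self_of_nodup _ (PySem.Set.nodup_ofList l)]

theorem pv_dedup_nil_iff (l : List String) :
    PySem.List.dedup l = [] ↔ l = [] := by
  cases l with
  | nil => simp
  | cons a l => simp [PySem.Set.ofList_cons]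

-- splitting the visited-filter after one more visited element
theorem pv_filter_add (v : List String) (x : String) (l : List String) :
    l.filter (fun y => !(PySem.Set.contains (PySem.Set.add v x) y)) =
    (l.filter (fun y => !(PySem.Set.contains v y))).filter (fun y => !(y == x)) := by
  rw [List.filter_filter]
  apply List.filter_congr
  intro y _
  simp only [pv_contains_eq, PySem.Set.mem_add]
  by_cases h1 : y ∈ v <;> by_cases h2 : y = x <;> simp [h1, h2]

-- loopB step equations -------------------------------------------------------

theorem pv_loopB_nil (d : PySem.Dict String (List String)) (v : List String) :
    loopB d v [] = v := by
  rw [loopB]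

theorem pv_loopB_skip (d : PySem.Dict String (List String)) (v : List String) (x : String)
    (rest : List String) (h : PySem.Set.contains v x = true) :
    loopB d v (x :: rest) = loopB d v rest := by
  rw [loopB, dif_pos h]

theorem pv_loopB_visit (d : PySem.Dict String (List String)) (v : List String) (x : String)
    (rest : List String) (h : PySem.Set.contains v x = false) :
    loopB d v (x :: rest) =
      loopB d (PySem.Set.add v x)
        (rest ++ PySem.Set.diff (pvNbrs d x) (PySem.Set.add v x)) := by
  rw [loopB, dif_neg (by rw [h]; simp)]
  rfl

theorem pv_skipAll (d : PySem.Dict String (List String)) (v : List String) :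
    ∀ (a r : List String), (∀ x ∈ a, x ∈ v) → loopB d v (a ++ r) = loopB d v r := by
  intro a
  induction a with
  | nil => intro r _; rfl
  | cons x t ih =>
    intro r h
    rw [List.cons_append,
      pv_loopB_skip d v x (t ++ r) ((PySem.Set.contains_iff v x).mpr (h x List.mem_cons_self))]
    exact ih r (fun y hy => h y (List.mem_cons_of_mem _ hy))

theorem pv_loopB_allv (d : PySem.Dict String (List String)) (v q : List String)
    (h : ∀ x ∈ q, x ∈ v) : loopB d v q = v := by
  have := pv_skipAll d v q [] h
  rw [List.append_nil] at this
  rw [this, pv_loopB_nil]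

-- generic strict measure decrease after one new visit
theorem pvMeasure_lt_gen (d : PySem.Dict String (List String)) (v v' q q' : List String)
    (x : String) (hx : x ∈ q) (hxv : x ∉ v) (hxv' : x ∈ v')
    (hsub : ∀ y ∈ q', y ∈ q ∨ y ∈ pvUniv d) (hvv : ∀ y ∈ v, y ∈ v') :
    pvMeasure d v' q' < pvMeasure d v q := by
  apply Finset.card_lt_card
  rw [Finset.ssubset_iff_of_subset]
  · refine ⟨x, ?_, ?_⟩
    · simp only [Finset.mem_sdiff, Finset.mem_union, List.mem_toFinset]
      exact ⟨Or.inl hx, hxv⟩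
    · simp only [Finset.mem_sdiff, Finset.mem_union, List.mem_toFinset]
      rintro ⟨-, h2⟩
      exact h2 hxv'
  · intro y hy
    simp only [Finset.mem_sdiff, Finset.mem_union, List.mem_toFinset] at hy ⊢
    rcases hy with ⟨hy1, hy2⟩
    refine ⟨?_, fun hmem => hy2 (hvv y hmem)⟩
    rcases hy1 with h1 | h1
    · exact hsub y h1
    · exact Or.inr h1

-- KEY: loopB depends on the queue only through the deduplicated unvisited subsequence
theorem pv_key (d : PySem.Dict String (List String)) :
    ∀ (M : Nat) (v q q' : List String), pvMeasure d v q ≤ M →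
    PySem.List.dedup (q.filter (fun x => !(PySem.Set.contains v x))) =
      PySem.List.dedup (q'.filter (fun x => !(PySem.Set.contains v x))) →
    loopB d v q = loopB d v q' := by
  intro M
  induction M with
  | zero =>
    intro v q q' hM hdd
    -- measure 0: every element of q is visited
    have hq : ∀ x ∈ q, x ∈ v := by
      intro x hx
      by_contra hxv
      have : x ∈ (q.toFinset ∪ (pvUniv d).toFinset) \ v.toFinset := by
        simp only [Finset.mem_sdiff, Finset.mem_union, List.mem_toFinset]
        exact ⟨Or.inl hx, hxv⟩
      have : 0 < pvMeasure d v q := Finset.card_pos.mpr ⟨x, this⟩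
      omega
    have hfil : q.filter (fun x => !(PySem.Set.contains v x)) = [] := by
      apply List.filter_eq_nil_iff.mpr
      intro x hx
      simp [hq x hx]
    rw [hfil] at hdd
    have hfil' : q'.filter (fun x => !(PySem.Set.contains v x)) = [] :=
      (pv_dedup_nil_iff _).mp hdd.symm
    have hq' : ∀ x ∈ q', x ∈ v := by
      intro x hx
      by_contra hxv
      have hxf : x ∈ q'.filter (fun x => !(PySem.Set.contains v x)) := by
        apply List.mem_filter.mpr
        refine ⟨hx, ?_⟩
        simp [hxv]
      rw [hfil'] at hxf; cases hxf
    rw [pv_loopB_allv d v q hq, pv_loopB_allv d v q' hq']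
  | succ M ih =>
    intro v q q' hM hdd
    cases hq : q.filter (fun x => !(PySem.Set.contains v x)) with
    | nil =>
      -- same as base case
      have hqv : ∀ x ∈ q, x ∈ v := by
        intro x hx
        by_contra hxv
        have hxf : x ∈ q.filter (fun x => !(PySem.Set.contains v x)) :=
          List.mem_filter.mpr ⟨hx, by simp [hxv]⟩
        rw [hq] at hxf; cases hxf
      rw [hq] at hdd
      have hfil' : q'.filter (fun x => !(PySem.Set.contains v x)) = [] :=
        (pv_dedup_nil_iff _).mp hdd.symm
      have hq'v : ∀ x ∈ q', x ∈ v := by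
        intro x hx
        by_contra hxv
        have hxf : x ∈ q'.filter (fun x => !(PySem.Set.contains v x)) :=
          List.mem_filter.mpr ⟨hx, by simp [hxv]⟩
        rw [hfil'] at hxf; cases hxf
      rw [pv_loopB_allv d v q hqv, pv_loopB_allv d v q' hq'v]
    | cons x t =>
      -- q' must also have first unvisited element x
      rw [hq] at hdd
      cases hq' : q'.filter (fun x => !(PySem.Set.contains v x)) with
      | nil =>
        rw [hq'] at hdd
        exact absurd ((pv_dedup_nil_iff _).mp hdd) (by simp)
      | cons x' t' =>
        rw [hq'] at hdd
        simp only [PySem.List.dedup_eq_ofList, PySem.Set.ofList_cons] at hdd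
        have hxx : x = x' := (List.cons.injEq _ _ _ _).mp hdd |>.1
        subst hxx
        have htt : (PySem.Set.ofList t).discard x = (PySem.Set.ofList t').discard x :=
          (List.cons.injEq _ _ _ _).mp hdd |>.2
        -- decompose q and q'
        obtain ⟨a, b, rfl, ha, hpx, hb⟩ := List.filter_eq_cons_iff.mp hq
        obtain ⟨a', b', rfl, ha', _, hb'⟩ := List.filter_eq_cons_iff.mp hq'
        have hav : ∀ y ∈ a, y ∈ v := by
          intro y hy
          have h1 := ha y hy
          simp at h1
          exact h1
        have ha'v : ∀ y ∈ a', y ∈ v := by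
          intro y hy
          have h1 := ha' y hy
          simp at h1
          exact h1
        have hxv : PySem.Set.contains v x = false := by
          simp only [Bool.not_eq_true'] at hpx; exact hpx
        have hxnv : x ∉ v := by
          intro hm
          rw [(PySem.Set.contains_iff v x).mpr hm] at hxv; cases hxv
        -- one visit step on each side
        rw [pv_skipAll d v a (x :: b) hav, pv_skipAll d v a' (x :: b') ha'v,
          pv_loopB_visit d v x b hxv, pv_loopB_visit d v x b' hxv]
        set vis := PySem.Set.add v x with hvis
        set push := PySem.Set.diff (pvNbrs d x) vis with hpush
        -- new dedup hypothesis
        have hstep : ∀ (bb tt : List String),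
            bb.filter (fun y => !(PySem.Set.contains v y)) = tt →
            PySem.List.dedup ((bb ++ push).filter (fun y => !(PySem.Set.contains vis y))) =
              PySem.Set.update ((PySem.Set.ofList tt).discard x)
                (push.filter (fun y => !(PySem.Set.contains vis y))) := by
          intro bb tt htt'
          rw [List.filter_append, pv_dedup_append, hvis, pv_filter_add, htt',
            pv_dedup_filter, ← pv_discard_eq, PySem.List.dedup_eq_ofList]
        have hdd2 : PySem.List.dedup ((b ++ push).filter (fun y => !(PySem.Set.contains vis y))) =
            PySem.List.dedup ((b' ++ push).filter (fun y => !(PySem.Set.contains vis y))) := by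
          rw [hstep b t hb, hstep b' t' hb', htt]
        -- measure decrease
        have hmlt : pvMeasure d vis (b ++ push) ≤ M := by
          have hlt : pvMeasure d vis (b ++ push) < pvMeasure d v (a ++ x :: b) := by
            apply pvMeasure_lt_gen d v vis (a ++ x :: b) (b ++ push) x
              (by simp) hxnv ((PySem.Set.mem_add v x x).mpr (Or.inr rfl))
              (fun y hy => by
                rcases List.mem_append.mp hy with h | h
                · exact Or.inl (by simp [h])
                · exact Or.inr (pvNbrs_subset_univ d x y (by
                    rw [hpush, pv_diff_eq] at h; exact List.mem_of_mem_filter h)))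
              (fun y hy => (PySem.Set.mem_add v x y).mpr (Or.inl hy))
          omega
        rw [ih vis (b ++ push) (b' ++ push) hmlt hdd2]

-- the fold of A's inner loop --------------------------------------------------

theorem pv_foldA_fst (d : PySem.Dict String (List String)) (es : List String) :
    ∀ (v ne : List String),
      (es.foldl (fun (st : List String × List String) e =>
        let v := PySem.Set.add st.1 e
        (v, PySem.Set.update st.2 (PySem.Set.diff (pvNbrs d e) v))) (v, ne)).1 =
      es.foldl PySem.Set.add v := by
  induction es with
  | nil => intro v ne; rfl
  | cons e es ih => intro v ne; exact ih _ _

def pvBlocks (d : PySem.Dict String (List String)) : List String → List String → List String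
  | _, [] => []
  | v, e :: es =>
    PySem.Set.diff (pvNbrs d e) (PySem.Set.add v e) ++ pvBlocks d (PySem.Set.add v e) es

theorem pv_foldA_snd (d : PySem.Dict String (List String)) (es : List String) :
    ∀ (v ne : List String),
      (es.foldl (fun (st : List String × List String) e =>
        let v := PySem.Set.add st.1 e
        (v, PySem.Set.update st.2 (PySem.Set.diff (pvNbrs d e) v))) (v, ne)).2 =
      PySem.Set.update ne (pvBlocks d v es) := by
  induction es with
  | nil => intro v ne; rfl
  | cons e es ih =>
    intro v ne
    show (es.foldl _ (PySem.Set.add v e, PySem.Set.update ne _)).2 = _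
    rw [ih, pvBlocks, PySem.Set.update_append]

def pvCarry (d : PySem.Dict String (List String)) : List String → List String → List String
  | _, [] => []
  | v, e :: es =>
    if PySem.Set.contains v e then pvCarry d v es
    else PySem.Set.diff (pvNbrs d e) (PySem.Set.add v e) ++ pvCarry d (PySem.Set.add v e) es

-- B consumes one whole frontier level
theorem pv_level (d : PySem.Dict String (List String)) :
    ∀ (es c v : List String),
      loopB d v (es ++ c) = loopB d (es.foldl PySem.Set.add v) (c ++ pvCarry d v es) := by
  intro es
  induction es with
  | nil => intro c v; simp [pvCarry]
  | cons e es ih =>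
    intro c v
    cases hc : PySem.Set.contains v e with
    | true =>
      rw [List.cons_append, pv_loopB_skip d v e (es ++ c) hc, ih c v]
      rw [List.foldl_cons, PySem.Set.add_of_mem ((PySem.Set.contains_iff v e).mp hc)]
      rw [pvCarry, hc]; simp
    | false =>
      rw [List.cons_append, pv_loopB_visit d v e (es ++ c) hc, List.append_assoc, ih]
      rw [List.foldl_cons, pvCarry, hc]
      simp [List.append_assoc]

-- membership facts ------------------------------------------------------------

theorem pv_mem_foldl_add (es : List String) :
    ∀ (v : List String) (y : String), y ∈ es.foldl PySem.Set.add v ↔ y ∈ v ∨ y ∈ es := by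
  induction es with
  | nil => intro v y; simp
  | cons e es ih =>
    intro v y
    rw [List.foldl_cons, ih]
    rw [PySem.Set.mem_add]
    constructor
    · rintro ((h | h) | h)
      · exact Or.inl h
      · exact Or.inr (h ▸ List.mem_cons_self)
      · exact Or.inr (List.mem_cons_of_mem _ h)
    · rintro (h | h)
      · exact Or.inl (Or.inl h)
      · rcases List.mem_cons.mp h with h | h
        · exact Or.inl (Or.inr h)
        · exact Or.inr h

theorem pv_foldl_add_of_subset (es : List String) :
    ∀ (v : List String), (∀ e ∈ es, e ∈ v) → es.foldl PySem.Set.add v = v := by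
  induction es with
  | nil => intro v _; rfl
  | cons e es ih =>
    intro v h
    rw [List.foldl_cons, PySem.Set.add_of_mem (h e List.mem_cons_self)]
    exact ih v (fun y hy => h y (List.mem_cons_of_mem _ hy))

theorem pv_blocks_sub (d : PySem.Dict String (List String)) :
    ∀ (es v : List String) (x : String), x ∈ pvBlocks d v es → x ∈ pvUniv d := by
  intro es
  induction es with
  | nil => intro v x h; cases h
  | cons e es ih =>
    intro v x h
    rcases List.mem_append.mp h with h | h
    · exact pvNbrs_subset_univ d e x (PySem.Set.mem_diff _ _ _ |>.mp h).1
    · exact ih _ x h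

theorem pv_blocks_not_mem (d : PySem.Dict String (List String)) :
    ∀ (es v : List String) (x : String), x ∈ pvBlocks d v es → x ∉ v := by
  intro es
  induction es with
  | nil => intro v x h; cases h
  | cons e es ih =>
    intro v x h
    rcases List.mem_append.mp h with h | h
    · have := (PySem.Set.mem_diff _ _ _ |>.mp h).2
      intro hv
      exact this ((PySem.Set.mem_add v e x).mpr (Or.inl hv))
    · intro hv
      exact ih _ x h ((PySem.Set.mem_add v e x).mpr (Or.inl hv))

theorem pv_nbr_cover (d : PySem.Dict String (List String)) :
    ∀ (es v : List String) (u x : String), u ∈ es → x ∈ pvNbrs d u →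
      x ∈ es.foldl PySem.Set.add v ∨ x ∈ pvBlocks d v es := by
  intro es
  induction es with
  | nil => intro v u x h; cases h
  | cons e es ih =>
    intro v u x hu hx
    rcases List.mem_cons.mp hu with rfl | hu
    · by_cases hmem : x ∈ PySem.Set.add v u
      · left
        rw [List.foldl_cons, pv_mem_foldl_add]
        exact Or.inl hmem
      · right
        rw [pvBlocks]
        exact List.mem_append.mpr (Or.inl ((PySem.Set.mem_diff _ _ _).mpr ⟨hx, hmem⟩))
    · rcases ih (PySem.Set.add v e) u x hu hx with h | h
      · left; rw [List.foldl_cons]; exact h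
      · right; rw [pvBlocks]; exact List.mem_append.mpr (Or.inr h)

-- the bridge: after a level, A's frontier and B's carry agree up to visited elements
theorem pv_bridge (d : PySem.Dict String (List String)) (V' : List String) :
    ∀ (es v : List String), es.Nodup →
      (∀ e ∈ es, e ∈ v → ∀ x ∈ pvNbrs d e, x ∈ V') →
      (pvBlocks d v es).filter (fun y => !(PySem.Set.contains V' y)) =
        (pvCarry d v es).filter (fun y => !(PySem.Set.contains V' y)) := by
  intro es
  induction es with
  | nil => intro v _ _; rfl
  | cons e es ih =>
    intro v hnd hcl
    have hnd' := (List.nodup_cons.mp hnd).2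
    have hne := (List.nodup_cons.mp hnd).1
    cases hc : PySem.Set.contains v e with
    | true =>
      have hev : e ∈ v := (PySem.Set.contains_iff v e).mp hc
      rw [pvBlocks, pvCarry, hc, if_pos rfl, List.filter_append]
      have hdrop : (PySem.Set.diff (pvNbrs d e) (PySem.Set.add v e)).filter
          (fun y => !(PySem.Set.contains V' y)) = [] := by
        apply List.filter_eq_nil_iff.mpr
        intro y hy
        have hyn : y ∈ pvNbrs d e := (PySem.Set.mem_diff _ _ _ |>.mp hy).1
        have : y ∈ V' := hcl e List.mem_cons_self hev y hyn
        simp [this]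
      rw [hdrop, List.nil_append, PySem.Set.add_of_mem hev]
      exact ih v hnd' (fun e' he' hv' => hcl e' (List.mem_cons_of_mem _ he') hv')
    | false =>
      have hev : e ∉ v := fun hm => by
        rw [(PySem.Set.contains_iff v e).mpr hm] at hc; cases hc
      rw [pvBlocks, pvCarry, hc]
      simp only [Bool.false_eq_true, if_false]
      rw [List.filter_append, List.filter_append]
      congr 1
      apply ih _ hnd'
      intro e' he' hv'
      rcases (PySem.Set.mem_add v e e').mp hv' with h | rfl
      · exact hcl e' (List.mem_cons_of_mem _ he') h
      · exact absurd he' hne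

-- loopA step equations
theorem pv_loopA_nil (d : PySem.Dict String (List String)) (v : List String) (fuel : Nat) :
    loopA d v [] fuel = v := by
  cases fuel <;> rfl

theorem pv_loopA_succ (d : PySem.Dict String (List String)) (v : List String)
    (e : String) (es : List String) (fuel : Nat) :
    loopA d v (e :: es) (fuel + 1) =
      loopA d ((e :: es).foldl PySem.Set.add v)
        (PySem.List.dedup (pvBlocks d v (e :: es))) fuel := by
  rw [loopA]
  simp only [List.isEmpty_cons, Bool.false_eq_true, if_false]
  rw [pv_foldA_fst, pv_foldA_snd, PySem.Set.update_empty, PySem.List.dedup_eq_ofList]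

-- MAIN: the level loop equals the queue loop ---------------------------------
theorem pv_main (d : PySem.Dict String (List String)) :
    ∀ (fA : Nat) (v es : List String), es.Nodup →
      (∀ u ∈ v, ∀ x ∈ pvNbrs d u, x ∈ v ∨ x ∈ es) →
      (es ≠ [] → 2 * pvMeasure d v es + (if ∀ e ∈ es, e ∈ v then 2 else 1) ≤ fA) →
      loopA d v es fA = loopB d v es := by
  intro fA
  induction fA with
  | zero =>
    intro v es _ _ hf
    cases es with
    | nil => rw [pv_loopA_nil, pv_loopB_nil]
    | cons e es' =>
      exfalso
      have := hf (by simp)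
      split_ifs at this <;> omega
  | succ fA ih =>
    intro v es hnd hcl hf
    cases es with
    | nil => rw [pv_loopA_nil, pv_loopB_nil]
    | cons e es' =>
      set es := e :: es' with hes
      set v' := es.foldl PySem.Set.add v with hv'
      set ne := PySem.List.dedup (pvBlocks d v es) with hne
      rw [pv_loopA_succ, ← hes, ← hv', ← hne]
      -- B side: consume the level
      have hB : loopB d v es = loopB d v' (pvCarry d v es) := by
        conv_lhs => rw [← List.append_nil es]
        rw [pv_level d es [] v, List.nil_append, hv']
      -- bridge to ne
      have hmemv' : ∀ y, y ∈ v' ↔ y ∈ v ∨ y ∈ es := fun y => pv_mem_foldl_add es v y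
      have hdd : PySem.List.dedup (ne.filter (fun x => !(PySem.Set.contains v' x))) =
          PySem.List.dedup ((pvCarry d v es).filter (fun x => !(PySem.Set.contains v' x))) := by
        rw [hne, ← pv_dedup_filter, pv_dedup_idem]
        congr 1
        apply pv_bridge d v' es v hnd
        intro e' he' hv'' x hx
        rcases hcl e' hv'' x hx with h | h
        · exact (hmemv' x).mpr (Or.inl h)
        · exact (hmemv' x).mpr (Or.inr h)
      have hkey : loopB d v' ne = loopB d v' (pvCarry d v es) :=
        pv_key d (pvMeasure d v' ne) v' ne (pvCarry d v es) le_rfl hdd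
      rw [hB, ← hkey]
      -- now recurse
      apply ih v' ne
      · rw [hne]; exact PySem.Set.nodup_ofList _
      · -- closure
        intro u hu x hx
        rcases (hmemv' u).mp hu with h | h
        · rcases hcl u h x hx with h' | h'
          · exact Or.inl ((hmemv' x).mpr (Or.inl h'))
          · exact Or.inl ((hmemv' x).mpr (Or.inr h'))
        · rcases pv_nbr_cover d es v u x h hx with h' | h'
          · exact Or.inl (hv' ▸ h')
          · right; rw [hne, PySem.List.dedup_eq_ofList]; exact (PySem.Set.mem_ofList _ _).mpr h'
      · -- fuel
        intro hnenil
        have hf' := hf (by simp [hes])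
        by_cases hsub : ∀ e'' ∈ es, e'' ∈ v
        · -- stalled level: visited unchanged, next frontier disjoint from it
          rw [if_pos hsub] at hf'
          have hv'v : v' = v := by rw [hv']; exact pv_foldl_add_of_subset es v hsub
          have hle : pvMeasure d v' ne ≤ pvMeasure d v es := by
            rw [hv'v]
            apply pvMeasure_le
            intro y hy
            right
            apply pv_blocks_sub d es v y
            rw [hne, PySem.List.dedup_eq_ofList] at hy
            exact (PySem.Set.mem_ofList _ _).mp hy
          have hnsub : ¬ ∀ e'' ∈ ne, e'' ∈ v' := by
            intro hall
            cases hne' : ne with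
            | nil => exact hnenil hne'
            | cons y ys =>
              have hy : y ∈ ne := hne' ▸ List.mem_cons_self
              have : y ∈ pvBlocks d v es := by
                rw [hne, PySem.List.dedup_eq_ofList] at hy
                exact (PySem.Set.mem_ofList _ _).mp hy
              exact pv_blocks_not_mem d es v y this (hv'v ▸ hall y hy)
          rw [if_neg hnsub]
          omega
        · -- some frontier element is newly visited
          rw [if_neg hsub] at hf'
          rw [not_forall] at hsub
          obtain ⟨e₀, he₀'⟩ := hsub
          rw [Classical.not_imp] at he₀'
          obtain ⟨he₀, he₀v⟩ := he₀'
          have hlt : pvMeasure d v' ne < pvMeasure d v es := by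
            apply pvMeasure_lt_gen d v v' es ne e₀ he₀ he₀v ((hmemv' e₀).mpr (Or.inr he₀))
            · intro y hy
              right
              apply pv_blocks_sub d es v y
              rw [hne, PySem.List.dedup_eq_ofList] at hy
              exact (PySem.Set.mem_ofList _ _).mp hy
            · intro y hy; exact (hmemv' y).mpr (Or.inl hy)
          split_ifs <;> omega

-- ===== VERDICT (by name: the statement is the Claim_ definition above) =====
theorem connected_set_spec : Claim_equal_connected_set := by
  unfold Claim_equal_connected_set
  intro g n _
  unfold Spec_connected_set connected_set connected_set_alt
  show loopA (graphAsDict g) PySem.Set.empty (PySem.Set.add PySem.Set.empty n) _ =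
    loopB (graphAsDict g) PySem.Set.empty [n]
  have hadd : PySem.Set.add PySem.Set.empty n = [n] := rfl
  rw [hadd]
  apply pv_main (graphAsDict g) _ PySem.Set.empty [n] (by simp)
  · intro u hu; cases hu
  · intro _
    have hsub : ¬ ∀ e ∈ [n], e ∈ (PySem.Set.empty : List String) := by
      intro h
      exact (List.not_mem_nil (a := n)) (h n List.mem_cons_self)
    rw [if_neg hsub]
    have hm : pvMeasure (graphAsDict g) PySem.Set.empty [n] ≤ 1 + (pvUniv (graphAsDict g)).length := by
      unfold pvMeasure
      calc (([n].toFinset ∪ (pvUniv (graphAsDict g)).toFinset) \ (PySem.Set.empty : List String).toFinset).card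
          ≤ ([n].toFinset ∪ (pvUniv (graphAsDict g)).toFinset).card := Finset.card_le_card (Finset.sdiff_subset)
        _ ≤ [n].toFinset.card + (pvUniv (graphAsDict g)).toFinset.card := Finset.card_union_le _ _
        _ ≤ 1 + (pvUniv (graphAsDict g)).length := by
            have hcle := (pvUniv (graphAsDict g)).toFinset_card_le
            simp only [List.toFinset_cons, List.toFinset_nil, insert_empty_eq,
              Finset.card_singleton]
            omega
    show 2 * pvMeasure (graphAsDict g) PySem.Set.empty [n] + 1 ≤
      2 * (pvUniv (graphAsDict g)).length + 3
    omega
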